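-- pv_equiv track=rewrite | github.com/haillogant/csc349-lab1 | hngo08_lab1.py | findSingleton
-- ===== SOURCE A (Python) =====
-- def findSingleton(arr):
--     lo = 0
--     hi = len(arr) - 1
--
--     while lo < hi:
--         mid = (lo + hi) // 2
--
--         if mid % 2 == 1:
--                mid -= 1
--         if arr[mid] == arr[mid + 1]: #the singleton is on the right side
--                lo = mid + 2
--         else: #the singleton is on the left side
--                hi = mid
--
--     return arr[lo]
-- ===== SOURCE B (Python) =====
-- def findSingleton(arr):
--     # Binary search over pair indices: position k stands for the pair
--     # (arr[2k], arr[2k+1]); no mid-parity adjustment is needed.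
--     def go(k, h):
--         if k >= h:
--             return arr[2 * k]
--         m = (k + h) // 2
--         if arr[2 * m] == arr[2 * m + 1]:
--             return go(m + 1, h)
--         return go(k, m)
--     return go(0, (len(arr) - 1) // 2)
-- ===== Notes on version B (the rewrite author's own statement) =====
-- stated objective: simpler
-- what changed: Replaces A's iterative binary search over raw even indices (midpoint with explicit parity decrement) by a recursive binary search over pair indices k, where pair k is (arr[2k], arr[2k+1]), so the parity adjustment disappears.
-- outside the precondition, e.g. on findSingleton([0, 1, 0, 0]): A returns 0, B returns 0; on findSingleton([1, 1]): A raises IndexError, B returns 1; on findSingleton([]): A raises IndexError, B raises IndexError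
import Mathlib
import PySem

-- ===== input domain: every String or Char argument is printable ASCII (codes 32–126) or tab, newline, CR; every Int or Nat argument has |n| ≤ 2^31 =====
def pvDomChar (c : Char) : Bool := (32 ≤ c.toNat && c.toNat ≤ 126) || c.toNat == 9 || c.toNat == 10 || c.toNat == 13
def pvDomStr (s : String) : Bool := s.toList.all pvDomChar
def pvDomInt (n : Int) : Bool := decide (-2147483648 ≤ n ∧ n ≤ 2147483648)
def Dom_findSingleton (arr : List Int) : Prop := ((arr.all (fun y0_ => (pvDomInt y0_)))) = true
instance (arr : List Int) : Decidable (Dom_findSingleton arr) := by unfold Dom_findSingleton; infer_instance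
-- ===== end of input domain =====

-- B replaces A's even-index binary search (with its mid-parity adjustment) by a recursive
-- binary search over pair indices k ↦ (arr[2k], arr[2k+1]); objective: alternative/simpler.

-- ===== PORT A =====
-- literal port of A's while loop: state (lo, hi), midpoint with parity adjustment.
-- The Nat argument is fuel making the loop structurally recursive; with fuel
-- (hi - lo).toNat it is never exhausted before the guard lo < hi fails.
def loopA (arr : List Int) : Nat → Int → Int → Int
  | 0, lo, _ => PySem.List.pyGetD arr lo 0
  | f + 1, lo, hi =>
    if lo < hi then
      let mid0 := PySem.Int.floordiv (lo + hi) 2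
      let mid := if PySem.Int.mod mid0 2 = 1 then mid0 - 1 else mid0
      if PySem.List.pyGetD arr mid 0 = PySem.List.pyGetD arr (mid + 1) 0 then
        loopA arr f (mid + 2) hi
      else
        loopA arr f lo mid
    else
      PySem.List.pyGetD arr lo 0

def findSingleton (arr : List Int) : Int :=
  loopA arr (PySem.List.len arr - 1).toNat 0 (PySem.List.len arr - 1)

-- ===== PORT B =====
-- recursive binary search over pair indices k (pair k = arr[2k], arr[2k+1]);
-- fuel (h - k).toNat makes the recursion structural and is never exhausted early.
def goB (arr : List Int) : Nat → Int → Int → Int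
  | 0, k, _ => PySem.List.pyGetD arr (2 * k) 0
  | f + 1, k, h =>
    if k ≥ h then
      PySem.List.pyGetD arr (2 * k) 0
    else
      let m := PySem.Int.floordiv (k + h) 2
      if PySem.List.pyGetD arr (2 * m) 0 = PySem.List.pyGetD arr (2 * m + 1) 0 then
        goB arr f (m + 1) h
      else
        goB arr f k m

def findSingleton_alt (arr : List Int) : Int :=
  goB arr (PySem.Int.floordiv (PySem.List.len arr - 1) 2).toNat 0
    (PySem.Int.floordiv (PySem.List.len arr - 1) 2)

-- ===== PRECONDITION & SPEC =====
-- Pre_ excludes the empty list and even-length arrays whose last two elements are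
-- equal: on exactly those A can run off the right end and raise IndexError (e.g. [] or [1, 1]).
def Pre_findSingleton (arr : List Int) : Prop :=
  arr ≠ [] ∧ (arr.length % 2 = 1 ∨ arr[arr.length - 2]? ≠ arr[arr.length - 1]?)
instance (arr : List Int) : Decidable (Pre_findSingleton arr) := by unfold Pre_findSingleton; infer_instance
def pvWitness_findSingleton : List Int := [1, 1, 2]

def Spec_findSingleton (arr : List Int) (out : Int) : Prop := out = findSingleton_alt arr
instance (arr : List Int) (out : Int) : Decidable (Spec_findSingleton arr out) := by unfold Spec_findSingleton; infer_instance

-- ===== CLAIM (what is proved, stated in full; the proofs are below) =====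
def Claim_equal_findSingleton : Prop := ∀ (arr : List Int), Dom_findSingleton arr → Pre_findSingleton arr → Spec_findSingleton arr (findSingleton arr)

-- ===== LEMMAS AND PROOFS =====

theorem goB_base (arr : List Int) (f : Nat) (k h : Int) (hkh : h ≤ k) :
    goB arr f k h = PySem.List.pyGetD arr (2 * k) 0 := by
  cases f with
  | zero => rfl
  | succ f => simp [goB, hkh]

-- the two searches coincide under the index bijection lo = 2k, hi = 2h + e:
-- e = 0 is the odd-length regime; e = 1 (hi still odd) is allowed as long as the
-- top pair arr[2h], arr[2h+1] differs, which forces the first hi-update to land on 2h.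
theorem loopA_eq_goB (arr : List Int) :
    ∀ (f1 : Nat) (f2 : Nat) (k h e : Int),
      (e = 0 ∨ (e = 1 ∧ PySem.List.pyGetD arr (2 * h) 0 ≠ PySem.List.pyGetD arr (2 * h + 1) 0)) →
      (2 * h + e - 2 * k).toNat ≤ f1 → (h - k).toNat ≤ f2 →
      loopA arr f1 (2 * k) (2 * h + e) = goB arr f2 k h := by
  intro f1
  induction f1 with
  | zero =>
    intro f2 k h e he h1 h2
    rw [loopA, goB_base arr f2 k h (by omega)]
  | succ f1 ih =>
    intro f2 k h e he h1 h2
    by_cases hkh : k < h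
    · have hmb := PySem.Int.floordiv_two_mid_bounds (lo := k) (hi := h) (le_of_lt hkh)
      have hmlt : PySem.Int.floordiv (k + h) 2 < h := by
        rw [PySem.Int.floordiv_lt_iff_lt_mul (by omega)]; omega
      set m := PySem.Int.floordiv (k + h) 2 with hm
      -- A's (unadjusted) midpoint at (2k, 2h+e) is k + h, and the adjusted one is 2m
      have hmid0 : PySem.Int.floordiv (2 * k + (2 * h + e)) 2 = k + h := by
        rw [PySem.Int.floordiv_eq_iff_of_pos (by omega)]; omega
      have hmeq : k + h = 2 * m ∨ k + h = 2 * m + 1 := by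
        have := PySem.Int.floordiv_mul_add_mod (k + h) 2
        have h0 := PySem.Int.mod_nonneg (a := k + h) (b := 2) (by omega)
        have hlt := PySem.Int.mod_lt (a := k + h) (b := 2) (by omega)
        omega
      have hmod : PySem.Int.mod (k + h) 2 = 1 ↔ k + h = 2 * m + 1 := by
        have := PySem.Int.floordiv_mul_add_mod (k + h) 2
        have h0 := PySem.Int.mod_nonneg (a := k + h) (b := 2) (by omega)
        have hlt := PySem.Int.mod_lt (a := k + h) (b := 2) (by omega)
        omega
      obtain ⟨f2', rfl⟩ : ∃ f2', f2 = f2' + 1 := ⟨f2 - 1, by omega⟩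
      rw [loopA, goB]
      have hlt2 : 2 * k < 2 * h + e := by omega
      have hnk : ¬ (k ≥ h) := by omega
      simp only [hlt2, if_true, hnk, if_false, hmid0, ← hm]
      have hadj : (if PySem.Int.mod (k + h) 2 = 1 then k + h - 1 else k + h) = 2 * m := by
        split
        · omega
        · rcases hmeq with h' | h'
          · omega
          · exfalso; exact (by assumption : ¬ _) (hmod.mpr h')
      rw [hadj]
      split
      · have h2m : 2 * m + 2 = 2 * (m + 1) := by ring
        rw [h2m, ih f2' (m + 1) h e he (by omega) (by omega)]
      · have hz : (2 * m : Int) = 2 * m + 0 := by ring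
        rw [hz, ih f2' k m 0 (Or.inl rfl) (by omega) (by omega)]
    · -- k ≥ h: B is already at its base; A either exits too (e = 0 or k > h)
      -- or, with e = 1 and k = h, probes the differing top pair and exits next step
      rw [goB_base arr f2 k h (by omega)]
      rcases he with he | ⟨he, hne⟩
      · rw [loopA]
        have hng : ¬ (2 * k < 2 * h + e) := by omega
        rw [if_neg hng]
      · by_cases hke : k = h
        · subst hke he
          rw [loopA]
          have hg : 2 * k < 2 * k + 1 := by omega
          rw [if_pos hg]
          have hmid0 : PySem.Int.floordiv (2 * k + (2 * k + 1)) 2 = 2 * k := by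
            rw [PySem.Int.floordiv_eq_iff_of_pos (by omega)]; omega
          have hmod0 : PySem.Int.mod (2 * k) 2 = 0 :=
            (PySem.Int.mod_eq_zero_iff_dvd (2 * k) 2).mpr ⟨k, rfl⟩
          simp only [hmid0, hmod0]
          norm_num
          rw [if_neg hne]
          cases f1 with
          | zero => rfl
          | succ f1 =>
            rw [loopA]
            have : ¬ (2 * k < 2 * k) := by omega
            rw [if_neg this]
        · rw [loopA]
          have hng : ¬ (2 * k < 2 * h + e) := by omega
          rw [if_neg hng]

theorem findSingleton_spec : Claim_equal_findSingleton := by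
  intro arr _ hpre
  unfold Spec_findSingleton findSingleton findSingleton_alt
  have hlen : PySem.List.len arr = (arr.length : Int) := PySem.List.len_eq arr
  obtain ⟨hne, hpar⟩ := hpre
  have hlpos : 1 ≤ arr.length := by
    cases arr with
    | nil => exact absurd rfl hne
    | cons a t => simp
  set h := PySem.Int.floordiv (PySem.List.len arr - 1) 2 with hh
  have hdm : h * 2 + PySem.Int.mod (PySem.List.len arr - 1) 2 = PySem.List.len arr - 1 := by
    rw [hh]; exact PySem.Int.floordiv_mul_add_mod _ 2
  have hm0 := PySem.Int.mod_nonneg (a := PySem.List.len arr - 1) (b := 2) (by omega)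
  have hm2 := PySem.Int.mod_lt (a := PySem.List.len arr - 1) (b := 2) (by omega)
  rw [hlen] at hdm hm0 hm2
  by_cases hodd : arr.length % 2 = 1
  · -- odd length: len - 1 = 2h, the e = 0 regime
    have h2h : (PySem.List.len arr - 1) = 2 * h + 0 := by rw [hlen]; omega
    calc loopA arr (PySem.List.len arr - 1).toNat 0 (PySem.List.len arr - 1)
        = loopA arr (PySem.List.len arr - 1).toNat (2 * 0) (2 * h + 0) := by
          rw [h2h]; norm_num
      _ = goB arr h.toNat 0 h :=
          loopA_eq_goB arr _ _ 0 h 0 (Or.inl rfl) (by omega) (by omega)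
  · -- even length with distinct last two elements: len - 1 = 2h + 1, the e = 1 regime
    have hl2 : 2 ≤ arr.length := by omega
    have h2h : (PySem.List.len arr - 1) = 2 * h + 1 := by rw [hlen]; omega
    have hlh : (2 * h : Int) = (arr.length : Int) - 2 := by rw [hlen] at h2h; omega
    have htop : PySem.List.pyGetD arr (2 * h) 0 ≠ PySem.List.pyGetD arr (2 * h + 1) 0 := by
      have hx : arr[arr.length - 2]? ≠ arr[arr.length - 1]? := by tauto
      have e1 : PySem.List.pyGetD arr (2 * h) 0 = arr[arr.length - 2] := by
        rw [PySem.List.pyGetD_eq_getElem arr 0 (by omega) (by omega)]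
        congr 1
        omega
      have e2 : PySem.List.pyGetD arr (2 * h + 1) 0 = arr[arr.length - 1] := by
        rw [PySem.List.pyGetD_eq_getElem arr 0 (by omega) (by omega)]
        congr 1
        omega
      rw [e1, e2]
      intro hc
      apply hx
      rw [List.getElem?_eq_getElem (by omega), List.getElem?_eq_getElem (by omega), hc]
    calc loopA arr (PySem.List.len arr - 1).toNat 0 (PySem.List.len arr - 1)
        = loopA arr (PySem.List.len arr - 1).toNat (2 * 0) (2 * h + 1) := by
          rw [h2h]; norm_num
      _ = goB arr h.toNat 0 h :=
          loopA_eq_goB arr _ _ 0 h 1 (Or.inr ⟨rfl, htop⟩) (by omega) (by omega)
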